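-- pv_equiv track=rewrite | github.com/GAURAVSVNIT/Genesis | apps/backend/intelligence/trend_analyzer.py | _identify_audience
-- ===== SOURCE A (Python) =====
-- from typing import Dict, List, Optional, Tuple
--
-- def _identify_audience(topics: List[Dict]) -> str:
--     """Identify target audience based on trends."""
--     sources = [t.get("source", "") for t in topics]
--
--     if "linkedin" in sources:
--         return "professionals and business audience"
--     elif "reddit" in sources:
--         return "engaged community members"
--     elif "twitter" in sources:
--         return "social media users and general public"
--     else:
--         return "general audience"
-- ===== SOURCE B (Python) =====
-- _PRIORITY = {"linkedin": 0, "reddit": 1, "twitter": 2}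
-- _AUDIENCES = [
--     "professionals and business audience",
--     "engaged community members",
--     "social media users and general public",
--     "general audience",
-- ]
--
-- def _identify_audience(topics):
--     """Identify target audience based on trends."""
--     best = 3
--     for t in topics:
--         r = _PRIORITY.get(t.get("source", ""), 3)
--         if r < best:
--             best = r
--     return _AUDIENCES[best]
-- ===== Notes on version B (the rewrite author's own statement) =====
-- stated objective: alternative
-- what changed: Replaces building an intermediate sources list plus three fixed-order membership scans with a single pass over topics tracking the minimum priority rank via a priority map, then indexing into an ordered audience table.
import Mathlib
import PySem

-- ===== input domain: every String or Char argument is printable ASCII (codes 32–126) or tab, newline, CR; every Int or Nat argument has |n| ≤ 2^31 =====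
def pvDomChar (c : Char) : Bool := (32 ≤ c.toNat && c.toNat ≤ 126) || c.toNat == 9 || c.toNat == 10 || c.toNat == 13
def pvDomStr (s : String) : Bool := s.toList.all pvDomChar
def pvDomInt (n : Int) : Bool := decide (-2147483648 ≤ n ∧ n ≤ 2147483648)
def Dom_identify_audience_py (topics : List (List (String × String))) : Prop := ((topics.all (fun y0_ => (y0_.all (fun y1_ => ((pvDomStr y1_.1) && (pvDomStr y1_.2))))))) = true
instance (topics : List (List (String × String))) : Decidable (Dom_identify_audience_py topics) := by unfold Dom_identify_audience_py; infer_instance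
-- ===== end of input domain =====

-- B replaces A's intermediate sources list and three fixed-order membership scans
-- with a single pass tracking the minimum priority rank, then one table lookup (objective: alternative).

-- ===== PORT A =====
def identify_audience_py (topics : List (List (String × String))) : String :=
  let sources := topics.map (fun t => PySem.Dict.getD (PySem.Dict.mk t) "source" "")
  if sources.contains "linkedin" then "professionals and business audience"
  else if sources.contains "reddit" then "engaged community members"
  else if sources.contains "twitter" then "social media users and general public"
  else "general audience"

-- ===== PORT B =====
def pvPriority : PySem.Dict String Int :=
  PySem.Dict.mk [("linkedin", 0), ("reddit", 1), ("twitter", 2)]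

def pvAudiences : List String :=
  [ "professionals and business audience"
  , "engaged community members"
  , "social media users and general public"
  , "general audience" ]

def identify_audience_py_alt (topics : List (List (String × String))) : String :=
  let best := topics.foldl
    (fun best t =>
      let r := PySem.Dict.getD pvPriority (PySem.Dict.getD (PySem.Dict.mk t) "source" "") 3
      if r < best then r else best) 3
  (PySem.List.pyGet? pvAudiences best).getD ""  -- index always in range in Python

-- ===== PRECONDITION & SPEC =====
def Spec_identify_audience_py (topics : List (List (String × String))) (out : String) : Prop := out = identify_audience_py_alt topics
instance (topics : List (List (String × String))) (out : String) : Decidable (Spec_identify_audience_py topics out) := by unfold Spec_identify_audience_py; infer_instance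

-- ===== CLAIM (what is proved, stated in full; the proofs are below) =====
def Claim_equal_identify_audience_py : Prop := ∀ (topics : List (List (String × String))), Dom_identify_audience_py topics → Spec_identify_audience_py topics (identify_audience_py topics)

-- ===== LEMMAS AND PROOFS =====

def pvRk (s : String) : Int := PySem.Dict.getD pvPriority s 3

-- A's rank as an if-chain over the sources list (mirrors A's membership tests)
def pvChainR (ss : List String) : Int :=
  if ss.contains "linkedin" then 0
  else if ss.contains "reddit" then 1
  else if ss.contains "twitter" then 2
  else 3

theorem pvRank_gen (x : String) :
    PySem.Dict.getD pvPriority x 3 =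
      (if x = "linkedin" then (0:Int) else if x = "reddit" then 1
       else if x = "twitter" then 2 else 3) := by
  rw [PySem.Dict.getD_eq_get?_getD]
  unfold pvPriority
  rw [PySem.Dict.get?_mk_cons, PySem.Dict.get?_mk_cons, PySem.Dict.get?_mk_cons]
  split_ifs <;> simp_all [PySem.Dict.get?]

theorem pvFoldR (ss : List String) :
    ∀ a : Int, a ≤ 3 →
      ss.foldl (fun b s => if pvRk s < b then pvRk s else b) a = min a (pvChainR ss) := by
  induction ss with
  | nil => intro a ha; simp [pvChainR]; omega
  | cons s ss ih =>
    intro a ha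
    have hr : pvRk s ≤ 3 ∧ 0 ≤ pvRk s := by
      unfold pvRk; rw [pvRank_gen]; split_ifs <;> omega
    rw [List.foldl_cons, ih _ (by split_ifs <;> omega)]
    unfold pvRk pvChainR
    rw [pvRank_gen s]
    simp only [List.contains_cons, Bool.or_eq_true, beq_iff_eq]
    clear ih hr
    split_ifs <;> first | omega | tauto

-- ===== VERDICT (by name: the statement is the Claim_ definition above) =====
theorem identify_audience_py_spec : Claim_equal_identify_audience_py := by
  unfold Claim_equal_identify_audience_py
  intro topics _
  unfold Spec_identify_audience_py
  simp only [identify_audience_py, identify_audience_py_alt]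
  have h := pvFoldR (topics.map (fun t => PySem.Dict.getD (PySem.Dict.mk t) "source" "")) 3 (le_refl 3)
  simp only [pvRk] at h
  rw [List.foldl_map] at h
  rw [h]
  unfold pvChainR
  split_ifs <;> decide
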